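-- pv_equiv track=rewrite | github.com/cuizicheng1024/map-the-world | scripts/enrich_timelines_with_mimo.py | merge_relations
-- ===== SOURCE A (Python) =====
-- def merge_relations(existing: dict, segments_by_person: dict[str, list[dict]]) -> dict:
--     nodes = existing.get("nodes", [])
--     edges = existing.get("edges", [])
--     node_ids = {n["id"] for n in nodes}
--     edge_keys = {(e["from"], e["to"], e.get("type", ""), e.get("label", "")) for e in edges}
--
--     for person, segs in segments_by_person.items():
--         if person not in node_ids:
--             nodes.append({"id": person, "label": person, "kind": "person"})
--             node_ids.add(person)
--         for seg in segs:
--             org = seg["org_name"]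
--             if org not in node_ids:
--                 nodes.append({"id": org, "label": org, "kind": "org"})
--                 node_ids.add(org)
--             etype = "works_at"
--             label = seg.get("role", "") or "works_at"
--             ek = (person, org, etype, label)
--             if ek in edge_keys:
--                 continue
--             edges.append({"from": person, "to": org, "type": etype, "label": label})
--             edge_keys.add(ek)
--
--     return {"nodes": nodes, "edges": edges}
-- ===== SOURCE B (Python) =====
-- def merge_relations(existing: dict, segments_by_person: dict[str, list[dict]]) -> dict:
--     nodes = existing.get("nodes", [])
--     edges = existing.get("edges", [])
--
--     # Pass 1: flatten the wanted node stream (person, then its orgs), then ordered dedup-append.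
--     node_stream = [
--         c
--         for person, segs in segments_by_person.items()
--         for c in [(person, "person")] + [(s["org_name"], "org") for s in segs]
--     ]
--     seen = {n["id"] for n in nodes}
--     for ident, kind in node_stream:
--         if ident not in seen:
--             seen.add(ident)
--             nodes.append({"id": ident, "label": ident, "kind": kind})
--
--     # Pass 2: flatten the wanted edge-key stream, then ordered dedup-append.
--     edge_stream = [
--         (person, s["org_name"], "works_at", s.get("role", "") or "works_at")
--         for person, segs in segments_by_person.items()
--         for s in segs
--     ]
--     keys = {(e["from"], e["to"], e.get("type", ""), e.get("label", "")) for e in edges}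
--     for frm, to, typ, lab in edge_stream:
--         if (frm, to, typ, lab) not in keys:
--             keys.add((frm, to, typ, lab))
--             edges.append({"from": frm, "to": to, "type": typ, "label": lab})
--
--     return {"nodes": nodes, "edges": edges}
-- ===== Notes on version B (the rewrite author's own statement) =====
-- stated objective: alternative
-- what changed: A interleaves node and edge deduplication in one nested pass over segments_by_person; B first flattens the person/org candidate streams with comprehensions and then runs two independent generic ordered-dedup-append passes, one for nodes and one for edges.
import Mathlib
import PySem

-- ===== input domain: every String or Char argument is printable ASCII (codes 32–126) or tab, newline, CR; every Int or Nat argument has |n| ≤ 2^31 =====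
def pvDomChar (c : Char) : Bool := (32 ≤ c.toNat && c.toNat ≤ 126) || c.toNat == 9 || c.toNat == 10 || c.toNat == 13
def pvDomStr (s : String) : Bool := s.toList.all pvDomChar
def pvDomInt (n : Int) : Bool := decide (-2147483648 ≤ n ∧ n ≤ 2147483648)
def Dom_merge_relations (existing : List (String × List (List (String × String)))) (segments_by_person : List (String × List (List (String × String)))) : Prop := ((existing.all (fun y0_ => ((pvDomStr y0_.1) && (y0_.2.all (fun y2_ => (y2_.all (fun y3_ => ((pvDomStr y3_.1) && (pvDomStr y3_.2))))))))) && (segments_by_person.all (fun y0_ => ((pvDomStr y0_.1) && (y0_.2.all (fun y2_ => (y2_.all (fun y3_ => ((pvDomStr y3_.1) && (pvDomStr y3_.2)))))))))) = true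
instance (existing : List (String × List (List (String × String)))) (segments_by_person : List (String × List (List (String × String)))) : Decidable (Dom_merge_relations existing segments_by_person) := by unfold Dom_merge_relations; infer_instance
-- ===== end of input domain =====

-- B flattens the person/org candidate streams first and then runs two independent ordered
-- dedup-append passes (nodes, then edges) instead of A's single interleaved nested pass;
-- same cost, different decomposition. Both Pythons mutate existing's "nodes"/"edges" lists
-- in place exactly alike; the equivalence proved here is about the return value.

-- ===== PORT A =====
-- dict.get k dflt on an association list (first match; Python dicts have unique keys)
def aget {α : Type} (d : List (String × α)) (k : String) (dflt : α) : α :=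
  match d with
  | [] => dflt
  | (k', v) :: rest => if k' == k then v else aget rest k dflt

-- the node / edge dict literals appended by the Python code
def pvNode (x kind : String) : List (String × String) := [("id", x), ("label", x), ("kind", kind)]
def pvEdge (p o t l : String) : List (String × String) := [("from", p), ("to", o), ("type", t), ("label", l)]
-- seg.get("role", "") or "works_at"  (empty string is falsy)
def pvRole (s : List (String × String)) : String :=
  let r := aget s "role" ""
  if r == "" then "works_at" else r
def edgeKeyOf (e : List (String × String)) : String × String × String × String :=
  (aget e "from" "", aget e "to" "", aget e "type" "", aget e "label" "")

-- loop state: (nodes, node_ids, edges, edge_keys)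
def StA : Type := List (List (String × String)) × PySem.Set String × List (List (String × String)) × PySem.Set (String × String × String × String)

-- body of A's inner `for seg in segs` loop
def innerA (person : String) (st : StA) (seg : List (String × String)) : StA :=
  let org := aget seg "org_name" ""
  let st2 := if st.2.1.contains org then st
             else (st.1 ++ [pvNode org "org"], st.2.1.add org, st.2.2.1, st.2.2.2)
  let label := pvRole seg
  let ek := (person, org, "works_at", label)
  if st2.2.2.2.contains ek then st2
  else (st2.1, st2.2.1, st2.2.2.1 ++ [pvEdge person org "works_at" label], st2.2.2.2.add ek)

-- body of A's outer `for person, segs in segments_by_person.items()` loop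
def outerA (st : StA) (pe : String × List (List (String × String))) : StA :=
  let person := pe.1
  let st1 := if st.2.1.contains person then st
             else (st.1 ++ [pvNode person "person"], st.2.1.add person, st.2.2.1, st.2.2.2)
  pe.2.foldl (innerA person) st1

def merge_relations (existing : List (String × List (List (String × String)))) (segments_by_person : List (String × List (List (String × String)))) : List (String × List (List (String × String))) :=
  let nodes := aget existing "nodes" []
  let edges := aget existing "edges" []
  let node_ids : PySem.Set String := PySem.Set.ofList (nodes.map (fun n => aget n "id" ""))
  let edge_keys := PySem.Set.ofList (edges.map edgeKeyOf)
  let st := segments_by_person.foldl outerA (nodes, node_ids, edges, edge_keys)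
  [("nodes", st.1), ("edges", st.2.2.1)]

-- ===== PORT B =====
-- ordered dedup-append of a node candidate (ident, kind)
def nstep (acc : List (List (String × String)) × PySem.Set String) (c : String × String) :
    List (List (String × String)) × PySem.Set String :=
  if acc.2.contains c.1 then acc else (acc.1 ++ [pvNode c.1 c.2], acc.2.add c.1)

-- ordered dedup-append of an edge key (from, to, type, label)
def estep (acc : List (List (String × String)) × PySem.Set (String × String × String × String))
    (c : String × String × String × String) :
    List (List (String × String)) × PySem.Set (String × String × String × String) :=
  if acc.2.contains c then acc
  else (acc.1 ++ [pvEdge c.1 c.2.1 c.2.2.1 c.2.2.2], acc.2.add c)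

def nodeStream (sbp : List (String × List (List (String × String)))) : List (String × String) :=
  sbp.flatMap (fun pe => (pe.1, "person") :: pe.2.map (fun s => (aget s "org_name" "", "org")))

def edgeStream (sbp : List (String × List (List (String × String)))) :
    List (String × String × String × String) :=
  sbp.flatMap (fun pe => pe.2.map (fun s => (pe.1, aget s "org_name" "", "works_at", pvRole s)))

def merge_relations_alt (existing : List (String × List (List (String × String)))) (segments_by_person : List (String × List (List (String × String)))) : List (String × List (List (String × String))) :=
  let nodes := aget existing "nodes" []
  let edges := aget existing "edges" []
  let nacc := (nodeStream segments_by_person).foldl nstep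
      (nodes, PySem.Set.ofList (nodes.map (fun n => aget n "id" "")))
  let eacc := (edgeStream segments_by_person).foldl estep
      (edges, PySem.Set.ofList (edges.map edgeKeyOf))
  [("nodes", nacc.1), ("edges", eacc.1)]

-- ===== PRECONDITION & SPEC =====
-- Pre_ excludes exactly the inputs where Python A raises KeyError: a node dict without "id",
-- an edge dict without "from" or "to", or a segment dict without "org_name" (stated over every
-- ("nodes", v) / ("edges", v) pair of existing; Python dicts have unique keys, so this is the
-- first-match lookup the ports perform).
def Pre_merge_relations (existing : List (String × List (List (String × String)))) (segments_by_person : List (String × List (List (String × String)))) : Prop :=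
  ((existing.all (fun kv =>
      (!(kv.1 == "nodes") || kv.2.all (fun n => n.any (fun p => p.1 == "id"))) &&
      (!(kv.1 == "edges") || kv.2.all (fun e => e.any (fun p => p.1 == "from") && e.any (fun p => p.1 == "to"))))) &&
   (segments_by_person.all (fun pe => pe.2.all (fun s => s.any (fun p => p.1 == "org_name"))))) = true
instance (existing : List (String × List (List (String × String)))) (segments_by_person : List (String × List (List (String × String)))) : Decidable (Pre_merge_relations existing segments_by_person) := by unfold Pre_merge_relations; infer_instance

def pvWitness_merge_relations : (List (String × List (List (String × String)))) × (List (String × List (List (String × String)))) :=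
  ([("nodes", [[("id", "x"), ("label", "x"), ("kind", "org")]]), ("edges", [])],
   [("p", [[("org_name", "x"), ("role", "dev")]])])

def Spec_merge_relations (existing : List (String × List (List (String × String)))) (segments_by_person : List (String × List (List (String × String)))) (out : List (String × List (List (String × String)))) : Prop := out = merge_relations_alt existing segments_by_person
instance (existing : List (String × List (List (String × String)))) (segments_by_person : List (String × List (List (String × String)))) (out : List (String × List (List (String × String)))) : Decidable (Spec_merge_relations existing segments_by_person out) := by unfold Spec_merge_relations; infer_instance

-- ===== CLAIM (what is proved, stated in full; the proofs are below) =====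
def Claim_equal_merge_relations : Prop := ∀ (existing : List (String × List (List (String × String)))) (segments_by_person : List (String × List (List (String × String)))), Dom_merge_relations existing segments_by_person → Pre_merge_relations existing segments_by_person → Spec_merge_relations existing segments_by_person (merge_relations existing segments_by_person)

-- ===== LEMMAS AND PROOFS =====
-- pair a node-pass state with an edge-pass state into A's combined loop state
def prodSt (a : List (List (String × String)) × PySem.Set String)
    (b : List (List (String × String)) × PySem.Set (String × String × String × String)) : StA :=
  (a.1, a.2, b.1, b.2)

-- one inner step of A = one nstep on the node state and one estep on the edge state
lemma innerA_prod (person : String) (seg : List (String × String)) (a b) :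
    innerA person (prodSt a b) seg =
      prodSt (nstep a (aget seg "org_name" "", "org"))
             (estep b (person, aget seg "org_name" "", "works_at", pvRole seg)) := by
  unfold innerA nstep estep prodSt
  by_cases h1 : aget seg "org_name" "" ∈ a.2 <;>
    by_cases h2 : (person, aget seg "org_name" "", "works_at", pvRole seg) ∈ b.2 <;>
      simp [h1, h2]

lemma inner_split (person : String) (segs : List (List (String × String))) :
    ∀ a b, segs.foldl (innerA person) (prodSt a b) =
      prodSt ((segs.map (fun s => (aget s "org_name" "", "org"))).foldl nstep a)
             ((segs.map (fun s => (person, aget s "org_name" "", "works_at", pvRole s))).foldl estep b) := by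
  induction segs with
  | nil => intro a b; rfl
  | cons s rest ih =>
    intro a b
    simp only [List.map_cons, List.foldl_cons, innerA_prod]
    exact ih _ _

-- the person-node step of A's outer loop only touches the node state
lemma outerA_prod (pe : String × List (List (String × String))) (a b) :
    outerA (prodSt a b) pe = pe.2.foldl (innerA pe.1) (prodSt (nstep a (pe.1, "person")) b) := by
  unfold outerA nstep prodSt
  by_cases h1 : pe.1 ∈ a.2 <;> simp [h1]

lemma outer_split (sbp : List (String × List (List (String × String)))) :
    ∀ a b, sbp.foldl outerA (prodSt a b) =
      prodSt ((nodeStream sbp).foldl nstep a) ((edgeStream sbp).foldl estep b) := by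
  induction sbp with
  | nil => intro a b; rfl
  | cons pe rest ih =>
    intro a b
    simp only [nodeStream, edgeStream, List.flatMap_cons, List.foldl_append, List.foldl_cons,
      List.foldl_cons, outerA_prod, inner_split]
    exact ih _ _

-- the same statement with the combined state written as A's literal 4-tuple
lemma outer_split4 (sbp : List (String × List (List (String × String))))
    (nodes : List (List (String × String))) (ids : PySem.Set String)
    (edges : List (List (String × String))) (keys : PySem.Set (String × String × String × String)) :
    sbp.foldl outerA (nodes, ids, edges, keys) =
      prodSt ((nodeStream sbp).foldl nstep (nodes, ids)) ((edgeStream sbp).foldl estep (edges, keys)) :=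
  outer_split sbp (nodes, ids) (edges, keys)

-- ===== VERDICT (by name: the statement is the Claim_ definition above) =====
theorem merge_relations_spec : Claim_equal_merge_relations := by
  intro existing sbp _ _
  unfold Spec_merge_relations
  simp only [merge_relations, merge_relations_alt, outer_split4]
  rfl
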